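-- pv_equiv track=rewrite | github.com/Coder-X15/Code_Alpha | Code_Alpha.py | tokenize_numstring
-- ===== SOURCE A (Python) =====
-- alphabets = ['A','B','C','D','E','F','G','H',
--      'I','J','K','L','M','N','O','P',
--      'Q','R','S','T','U','V','W','X','Y','Z','.','#','%','!','?','/',','] # series of alphabets in order (plus some symbols)
--
-- def tokenize_numstring(numstring):
--     '''tokenizes the number code for processing'''
--     words = [] # array of the words (tokens)
--     string = ""
--     for i in numstring:
--         if (i not in ['<','>'] or i.upper() not in alphabets) and (i.isdigit() or i == '-'):
--             string += i
--         else: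
--             words.append(string)
--             string = ""
--     for i in range(words.count('')):
--         words.remove('')
--     return words
-- ===== SOURCE B (Python) =====
-- def tokenize_numstring(numstring):
--     '''tokenizes the number code for processing'''
--     # Split the string into maximal runs of "numeric" characters (digits or '-')
--     # vs. delimiter characters, then keep the numeric runs; the final run is
--     # dropped (it is the trailing remainder that is never delimited).
--     groups = []
--     rest = numstring
--     while rest:
--         k = rest[0].isdigit() or rest[0] == '-'
--         run_len = 1
--         while run_len < len(rest) and (rest[run_len].isdigit() or rest[run_len] == '-') == k:
--             run_len += 1
--         groups.append((rest[:run_len], k))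
--         rest = rest[run_len:]
--     return [s for s, k in groups[:-1] if k]
-- ===== Notes on version B (the rewrite author's own statement) =====
-- stated objective: faster
-- what changed: B splits the string into maximal runs of numeric characters (digits and dashes) vs. other characters with a groupby-style two-pointer scan and keeps the numeric runs except the trailing one, instead of A's per-character accumulator with flush-on-delimiter followed by a count-and-remove pass that rescans the token list once per empty token.
import Mathlib
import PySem

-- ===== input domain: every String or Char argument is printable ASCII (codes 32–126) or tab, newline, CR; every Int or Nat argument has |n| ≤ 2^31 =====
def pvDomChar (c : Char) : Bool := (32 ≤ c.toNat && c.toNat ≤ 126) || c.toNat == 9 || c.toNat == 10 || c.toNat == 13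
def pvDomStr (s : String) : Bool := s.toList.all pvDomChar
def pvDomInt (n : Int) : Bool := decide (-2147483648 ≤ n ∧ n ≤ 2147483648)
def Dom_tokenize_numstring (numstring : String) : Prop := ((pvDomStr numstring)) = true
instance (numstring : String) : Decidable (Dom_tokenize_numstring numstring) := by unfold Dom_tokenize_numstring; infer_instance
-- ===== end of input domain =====

-- B splits the string into maximal numeric-vs-delimiter runs (groupby-style) instead of A's
-- char-by-char accumulator with a quadratic count-and-remove empty-token pass; same return value, measured faster.


-- ===== PORT A =====
-- module constant 'alphabets' (single-character strings, ported as Char)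
def pvAlphabets : List Char :=
  ['A','B','C','D','E','F','G','H','I','J','K','L','M','N','O','P',
   'Q','R','S','T','U','V','W','X','Y','Z','.','#','%','!','?','/',',']

def tokenize_numstring (numstring : String) : List String :=
  let st := numstring.toList.foldl
    (fun (st : List String × String) i =>
      if (!decide (i ∈ ['<','>']) || !decide (PySem.Chars.upperChar i ∈ pvAlphabets))
          && (PySem.Chars.isdigit i || i == '-') then
        (st.1, st.2.push i)
      else
        (st.1 ++ [st.2], ""))
    ([], "")
  -- for i in range(words.count('')): words.remove('')   (remove never fails here; getD is the guard)
  (PySem.List.pyRange 0 (st.1.count "") 1).foldl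
    (fun w _ => (PySem.List.remove? w "").getD w) st.1

-- ===== PORT B =====
def pvKey (c : Char) : Bool := PySem.Chars.isdigit c || c == '-'

-- inner while loop: extend run_len while the key stays equal
def tokRunLen (rest : List Char) (k : Bool) (j : Nat) : Nat :=
  if h : j < rest.length then
    if pvKey rest[j] = k then tokRunLen rest k (j + 1) else j
  else j
  termination_by rest.length - j

theorem tokRunLen_ge (rest : List Char) (k : Bool) (j : Nat) : j ≤ tokRunLen rest k j := by
  fun_induction tokRunLen <;> omega

-- outer while loop over the remaining string, collecting (run, key) groups
def tokGroups (rest : List Char) : List (List Char × Bool) :=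
  match rest with
  | [] => []
  | c :: t =>
    let k := pvKey c
    let rl := tokRunLen (c :: t) k 1
    ((c :: t).take rl, k) :: tokGroups ((c :: t).drop rl)
  termination_by rest.length
  decreasing_by
    have := tokRunLen_ge (c :: t) (pvKey c) 1
    simp only [List.length_drop, List.length_cons]
    omega

def tokenize_numstring_alt (numstring : String) : List String :=
  -- [s for s, k in groups[:-1] if k]
  (tokGroups numstring.toList).dropLast.filterMap
    (fun p => if p.2 then some (String.ofList p.1) else none)

-- ===== PRECONDITION & SPEC =====
def Spec_tokenize_numstring (numstring : String) (out : List String) : Prop := out = tokenize_numstring_alt numstring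
instance (numstring : String) (out : List String) : Decidable (Spec_tokenize_numstring numstring out) := by unfold Spec_tokenize_numstring; infer_instance

-- ===== CLAIM (what is proved, stated in full; the proofs are below) =====
def Claim_equal_tokenize_numstring : Prop := ∀ (numstring : String), Dom_tokenize_numstring numstring → Spec_tokenize_numstring numstring (tokenize_numstring numstring)

-- ===== LEMMAS AND PROOFS =====

-- A's branch condition is exactly "digit or dash" (the '<'/'>' clause is vacuous on such chars)
theorem condA_eq_pvKey (c : Char) :
    ((!decide (c ∈ ['<','>']) || !decide (PySem.Chars.upperChar c ∈ pvAlphabets))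
      && (PySem.Chars.isdigit c || c == '-')) = pvKey c := by
  by_cases h : c ∈ ['<','>']
  · simp only [List.mem_cons, List.not_mem_nil, or_false] at h
    rcases h with rfl | rfl <;> decide
  · simp [pvKey, h]

-- A's accumulator loop, with the condition reduced to pvKey
def Tks : List Char → String → List String
  | [], _ => []
  | c :: l, s => if pvKey c then Tks l (s.push c) else s :: Tks l ""

theorem foldA (l : List Char) (ws : List String) (s : String) :
    (l.foldl (fun (st : List String × String) i =>
      if (!decide (i ∈ ['<','>']) || !decide (PySem.Chars.upperChar i ∈ pvAlphabets))
          && (PySem.Chars.isdigit i || i == '-') then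
        (st.1, st.2.push i)
      else
        (st.1 ++ [st.2], "")) (ws, s)).1 = ws ++ Tks l s := by
  induction l generalizing ws s with
  | nil => simp [Tks]
  | cons c l ih =>
    simp only [condA_eq_pvKey] at ih ⊢
    simp only [List.foldl_cons]
    cases hk : pvKey c <;> simp [Tks, hk, ih]

-- the removal loop deletes exactly every '' (count-many first occurrences)
theorem foldl_const_iterate {α β : Type} (l : List α) (g : β → β) (b : β) :
    l.foldl (fun w _ => g w) b = g^[l.length] b := by
  induction l generalizing b with
  | nil => rfl
  | cons a t ih => simp [ih, Function.iterate_succ_apply]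

theorem filter_erase_empty (ws : List String) :
    (ws.erase "").filter (fun w => !(w == "")) = ws.filter (fun w => !(w == "")) := by
  induction ws with
  | nil => rfl
  | cons a t ih =>
    rw [List.erase_cons]
    by_cases h : a = "" <;> simp [h, ih]

theorem removeIter (n : Nat) (ws : List String) (h : ws.count "" = n) :
    (fun w => (PySem.List.remove? w "").getD w)^[n] ws = ws.filter (fun w => !(w == "")) := by
  induction n generalizing ws with
  | zero =>
    rw [Function.iterate_zero_apply]
    symm
    rw [List.filter_eq_self]
    intro a ha
    simp only [Bool.not_eq_eq_eq_not, Bool.not_true, beq_eq_false_iff_ne]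
    intro hae
    exact absurd (List.count_pos_iff.mpr (hae ▸ ha)) (by omega)
  | succ n ih =>
    have hmem : "" ∈ ws := List.count_pos_iff.mp (by omega)
    rw [Function.iterate_succ_apply]
    simp only [PySem.List.remove?_eq_some_erase ws "" hmem, Option.getD_some]
    rw [ih (ws.erase "") (by rw [List.count_erase_self]; omega), filter_erase_empty]

theorem removeLoop (ws : List String) :
    (PySem.List.pyRange 0 (ws.count "") 1).foldl
      (fun w _ => (PySem.List.remove? w "").getD w) ws = ws.filter (fun w => !(w == "")) := by
  rw [foldl_const_iterate]
  rw [show (PySem.List.pyRange 0 (ws.count "") 1).length = ws.count "" by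
    rw [PySem.List.length_pyRange_one]; simp]
  exact removeIter _ ws rfl

-- facts about the run scanner
theorem tokRunLen_le (rest : List Char) (k : Bool) (j : Nat) :
    j ≤ rest.length → tokRunLen rest k j ≤ rest.length := by
  fun_induction tokRunLen with
  | case1 j h hk ih => exact fun _ => ih (by omega)
  | case2 j h hk => omega
  | case3 j h => omega

theorem tokRunLen_key (rest : List Char) (k : Bool) (j : Nat) :
    ∀ i, j ≤ i → i < tokRunLen rest k j → ∀ (hi : i < rest.length), pvKey rest[i] = k := by
  fun_induction tokRunLen with
  | case1 j h hk ih =>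
    intro i hji hlt hi
    rcases Nat.eq_or_lt_of_le hji with rfl | hlt'
    · exact hk
    · exact ih i hlt' hlt hi
  | case2 j h hk => intro i hji hlt hi; omega
  | case3 j h => intro i hji hlt hi; omega

theorem tokRunLen_stop (rest : List Char) (k : Bool) (j : Nat) :
    ∀ (hh : tokRunLen rest k j < rest.length), pvKey rest[tokRunLen rest k j] ≠ k := by
  fun_induction tokRunLen with
  | case1 j h hk ih => exact ih
  | case2 j h hk => intro hh; exact hk
  | case3 j h => intro hh; omega

-- run lemmas for Tks
theorem toList_foldl_push (r : List Char) (s : String) :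
    (r.foldl String.push s).toList = s.toList ++ r := by
  induction r generalizing s with
  | nil => simp
  | cons c t ih => simp [ih]

theorem foldl_push_empty (r : List Char) : r.foldl String.push "" = String.ofList r := by
  apply String.toList_injective
  rw [toList_foldl_push]
  simp

theorem Tks_key_run (r m : List Char) (s : String) (h : ∀ x ∈ r, pvKey x = true) :
    Tks (r ++ m) s = Tks m (r.foldl String.push s) := by
  induction r generalizing s with
  | nil => rfl
  | cons c t ih =>
    have hc : pvKey c = true := h c (by simp)
    simp only [List.cons_append, Tks, hc, if_pos]
    exact ih _ (fun x hx => h x (by simp [hx]))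

theorem Tks_nonkey_run (r m : List Char) (h : ∀ x ∈ r, pvKey x = false) :
    Tks (r ++ m) "" = List.replicate r.length "" ++ Tks m "" := by
  induction r with
  | nil => rfl
  | cons c t ih =>
    have hc : pvKey c = false := h c (by simp)
    simp only [List.cons_append, Tks, hc, Bool.false_eq_true, List.length_cons,
      List.replicate_succ]
    simp [ih (fun x hx => h x (by simp [hx]))]

theorem tokGroups_ne_nil (c : Char) (t : List Char) : tokGroups (c :: t) ≠ [] := by
  simp [tokGroups]

-- the central equation: A's flushed-and-filtered tokens are B's kept groups
theorem main_eq (l : List Char) :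
    (Tks l "").filter (fun w => !(w == "")) =
      (tokGroups l).dropLast.filterMap
        (fun p => if p.2 then some (String.ofList p.1) else none) := by
  fun_induction tokGroups with
  | case1 => rfl
  | case2 c t k rl ih =>
    have hkdef : k = pvKey c := rfl
    have hrldef : rl = tokRunLen (c :: t) k 1 := rfl
    clear_value k rl
    subst hkdef
    subst hrldef
    have hge : 1 ≤ tokRunLen (c :: t) (pvKey c) 1 := tokRunLen_ge (c :: t) (pvKey c) 1
    have hle : tokRunLen (c :: t) (pvKey c) 1 ≤ (c :: t).length :=
      tokRunLen_le (c :: t) (pvKey c) 1 (by simp)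
    have hsplit : (c :: t).take (tokRunLen (c :: t) (pvKey c) 1) ++
        (c :: t).drop (tokRunLen (c :: t) (pvKey c) 1) = c :: t := List.take_append_drop _ _
    have hallkey : ∀ x ∈ (c :: t).take (tokRunLen (c :: t) (pvKey c) 1), pvKey x = pvKey c := by
      intro x hx
      obtain ⟨i, hi, rfl⟩ := List.mem_iff_getElem.mp hx
      have hi' : i < tokRunLen (c :: t) (pvKey c) 1 := by
        rw [List.length_take] at hi; omega
      rw [List.getElem_take]
      rcases Nat.eq_zero_or_pos i with rfl | hipos
      · rfl
      · exact tokRunLen_key (c :: t) (pvKey c) 1 i hipos hi' _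
    conv_lhs => rw [← hsplit]
    by_cases hk : pvKey c = true
    · -- digit/dash run: it becomes the accumulated string
      rw [Tks_key_run _ _ _ (fun x hx => (hallkey x hx).trans hk)]
      rw [foldl_push_empty]
      have hrne : (c :: t).take (tokRunLen (c :: t) (pvKey c) 1) ≠ [] := by
        cases hrl : tokRunLen (c :: t) (pvKey c) 1 with
        | zero => omega
        | succ n => simp
      have hofne : (String.ofList ((c :: t).take (tokRunLen (c :: t) (pvKey c) 1)) == "") = false := by
        rw [beq_eq_false_iff_ne]
        intro hc
        exact hrne (by simpa using congrArg String.toList hc)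
      cases hrest : (c :: t).drop (tokRunLen (c :: t) (pvKey c) 1) with
      | nil => simp [Tks, tokGroups]
      | cons d rest' =>
        rw [hrest] at ih
        have hrl_lt : tokRunLen (c :: t) (pvKey c) 1 < (c :: t).length := by
          by_contra hge'
          have hnil : (c :: t).drop (tokRunLen (c :: t) (pvKey c) 1) = [] :=
            List.drop_eq_nil_of_le (by omega)
          rw [hrest] at hnil; simp at hnil
        have hd : pvKey d = false := by
          have hstop := tokRunLen_stop (c :: t) (pvKey c) 1 hrl_lt
          have hdg : (c :: t)[tokRunLen (c :: t) (pvKey c) 1]'hrl_lt = d := by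
            have h0 : ((c :: t).drop (tokRunLen (c :: t) (pvKey c) 1))[0]'(by rw [hrest]; simp) =
                (c :: t)[tokRunLen (c :: t) (pvKey c) 1 + 0]'(by omega) := List.getElem_drop
            simp only [hrest, List.getElem_cons_zero, Nat.add_zero] at h0
            exact h0.symm
          rw [hdg] at hstop
          cases hpd : pvKey d
          · rfl
          · exact absurd (hk.trans hpd.symm).symm (by simpa using hstop)
        simp only [Tks, hd, Bool.false_eq_true]
        have hne : tokGroups (d :: rest') ≠ [] := tokGroups_ne_nil d rest'
        rw [List.dropLast_cons_of_ne_nil hne, List.filterMap_cons]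
        simp only [hk, if_pos]
        rw [← ih]
        rw [hk] at hofne
        simp [Tks, hd, hofne]
    · -- delimiter run: it only flushes empty strings, all filtered away
      have hk' : pvKey c = false := by simpa using hk
      rw [Tks_nonkey_run _ _ (fun x hx => (hallkey x hx).trans hk')]
      rw [List.filter_append]
      have hrep : (List.replicate ((c :: t).take (tokRunLen (c :: t) (pvKey c) 1)).length
          ("" : String)).filter (fun w => !(w == "")) = [] := by simp
      rw [hrep, List.nil_append]
      cases hrest : (c :: t).drop (tokRunLen (c :: t) (pvKey c) 1) with
      | nil => simp [Tks, tokGroups]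
      | cons d rest' =>
        rw [hrest] at ih
        rw [ih]
        have hne : tokGroups (d :: rest') ≠ [] := tokGroups_ne_nil d rest'
        rw [List.dropLast_cons_of_ne_nil hne, List.filterMap_cons]
        simp [hk']

-- ===== VERDICT (by name: the statement is the Claim_ definition above) =====
theorem tokenize_numstring_spec : Claim_equal_tokenize_numstring := by
  intro numstring _
  unfold Spec_tokenize_numstring tokenize_numstring tokenize_numstring_alt
  simp only []
  rw [foldA, List.nil_append, removeLoop, main_eq]
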